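-- pv_equiv track=rewrite | github.com/Issa-Kakar/CodeDocSync | codedocsync/suggestions/templates/numpy_template.py | _render_examples
-- ===== SOURCE A (Python) =====
-- def _render_examples(examples: list[str]) -> list[str]:
--     """Render examples section in NumPy style."""
--     if not examples:
--         return []
--
--     lines = ["Examples", "-" * 8, ""]
--
--     for example in examples:
--         # NumPy style examples often use doctest format
--         example_lines = example.strip().split("\n")
--         for example_line in example_lines:
--             lines.append(example_line)
--         lines.append("")
--
--     return lines[:-1]  # Remove trailing empty line
-- ===== SOURCE B (Python) =====
-- def _render_examples(examples: list[str]) -> list[str]: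
--     """Render examples section in NumPy style."""
--     if not examples:
--         return []
--     body = "\n\n".join(ex.strip() for ex in examples)
--     return ["Examples", "-" * 8, ""] + body.split("\n")
-- ===== Notes on version B (the rewrite author's own statement) =====
-- stated objective: idiomatic
-- what changed: Replaces A's nested per-line append loop plus trailing-blank-removal slice with a single '\n\n'.join of the stripped examples followed by one split('\n'), i.e. the body is built as one string rather than by per-line list appends.
import Mathlib
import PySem

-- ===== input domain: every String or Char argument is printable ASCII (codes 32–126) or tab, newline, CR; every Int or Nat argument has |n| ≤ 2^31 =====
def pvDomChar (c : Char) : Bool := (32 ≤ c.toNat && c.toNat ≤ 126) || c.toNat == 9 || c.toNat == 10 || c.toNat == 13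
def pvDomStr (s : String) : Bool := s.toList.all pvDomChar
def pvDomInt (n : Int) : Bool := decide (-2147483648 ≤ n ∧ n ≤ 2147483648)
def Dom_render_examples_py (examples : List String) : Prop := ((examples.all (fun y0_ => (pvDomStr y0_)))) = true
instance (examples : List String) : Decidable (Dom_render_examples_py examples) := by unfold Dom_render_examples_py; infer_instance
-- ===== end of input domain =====

-- B replaces A's nested append loop plus trailing-blank removal by one join-then-split over a single
-- string (objective: idiomatic); return values proved equal on all inputs.

-- ===== PORT A =====
-- example.strip().split("\n"): sep is the literal "\n" ≠ "", so Str.split? always returns some; .getD [] is exact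
def pySplitNL (s : String) : List String := (PySem.Str.split? s "\n").getD []

def render_examples_py (examples : List String) : List String :=
  if examples = [] then []
  else
    let lines : List String := ["Examples", String.ofList (List.replicate 8 '-'), ""]
    let lines := examples.foldl
      (fun lines exmpl =>
        let example_lines := pySplitNL (PySem.Str.strip exmpl)
        let lines := example_lines.foldl (fun lines example_line => lines ++ [example_line]) lines
        lines ++ [""])
      lines
    PySem.List.slice lines none (some (-1))   -- lines[:-1]

-- ===== PORT B =====
def render_examples_py_alt (examples : List String) : List String :=
  if examples = [] then []
  else
    let body := PySem.Str.join "\n\n" (examples.map (fun ex => PySem.Str.strip ex))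
    ["Examples", String.ofList (List.replicate 8 '-'), ""] ++ pySplitNL body

-- ===== PRECONDITION & SPEC =====
def Spec_render_examples_py (examples : List String) (out : List String) : Prop := out = render_examples_py_alt examples
instance (examples : List String) (out : List String) : Decidable (Spec_render_examples_py examples out) := by unfold Spec_render_examples_py; infer_instance

-- ===== CLAIM (what is proved, stated in full; the proofs are below) =====
def Claim_equal_render_examples_py : Prop := ∀ (examples : List String), Dom_render_examples_py examples → Spec_render_examples_py examples (render_examples_py examples)

-- ===== LEMMAS AND PROOFS =====

-- structural characterisation of splitting on a single '\n'
def splitNL : List Char → List (List Char)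
  | [] => [[]]
  | c :: rest => if c = '\n' then [] :: splitNL rest else (splitNL rest).modifyHead (fun h => c :: h)

theorem splitNL_ne_nil (l : List Char) : splitNL l ≠ [] := by
  cases l with
  | nil => simp [splitNL]
  | cons c rest =>
    simp only [splitNL]
    split_ifs
    · simp
    · intro h
      have := splitNL_ne_nil rest
      cases hr : splitNL rest with
      | nil => exact this hr
      | cons a t => rw [hr] at h; simp [List.modifyHead] at h

theorem splitOn_go_eq (fuel : Nat) : ∀ (l : List Char) (cur : List Char) (acc : List (List Char)),
    l.length ≤ fuel →
    PySem.Chars.splitOn.go ['\n'] fuel l cur acc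
      = acc.reverse ++ (splitNL l).modifyHead (fun h => cur.reverse ++ h) := by
  induction fuel with
  | zero =>
    intro l cur acc hl
    have : l = [] := by cases l <;> simp_all
    subst this
    simp [PySem.Chars.splitOn.go, splitNL]
  | succ f ih =>
    intro l cur acc hl
    cases l with
    | nil => simp [PySem.Chars.splitOn.go, splitNL]
    | cons c rest =>
      simp only [PySem.Chars.splitOn.go]
      by_cases hc : c = '\n'
      · subst hc
        have hpre : List.isPrefixOf ['\n'] ('\n' :: rest) = true := by simp [List.isPrefixOf]
        rw [if_pos hpre]
        simp only [List.length_cons] at hl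
        simp only [List.length_cons, List.length_nil, List.drop_succ_cons, List.drop_zero]
        rw [ih rest [] _ (by omega)]
        simp only [splitNL, List.reverse_cons, List.append_assoc,
          List.reverse_nil, List.nil_append]
        cases hs : splitNL rest <;> simp [List.modifyHead]
      · have hpre : List.isPrefixOf ['\n'] (c :: rest) = false := by
          simp [List.isPrefixOf]
          exact fun h => (hc h.symm).elim
        rw [if_neg (by simp [hpre])]
        simp only [List.length_cons] at hl
        rw [ih rest (c :: cur) acc (by omega)]
        congr 1
        obtain ⟨h, t, hr⟩ : ∃ h t, splitNL rest = h :: t := by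
          cases hs : splitNL rest with
          | nil => exact absurd hs (splitNL_ne_nil rest)
          | cons a t => exact ⟨a, t, rfl⟩
        simp [splitNL, hr, hc, List.modifyHead]

theorem splitOn_eq_splitNL (l : List Char) : PySem.Chars.splitOn l ['\n'] = splitNL l := by
  unfold PySem.Chars.splitOn
  rw [splitOn_go_eq (l.length + 1) l [] [] (by omega)]
  cases hs : splitNL l with
  | nil => exact absurd hs (splitNL_ne_nil l)
  | cons a t => simp [List.modifyHead]

theorem pySplitNL_toList (s : String) :
    (pySplitNL s).map String.toList = splitNL s.toList := by
  have h := PySem.Str.split?_map s "\n"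
  simp only [PySem.Chars.split?] at h
  simp only [pySplitNL]
  cases hq : PySem.Str.split? s "\n" with
  | none => rw [hq] at h; simp at h
  | some xs =>
    rw [hq] at h
    simp only [Option.map_some] at h
    have : ("\n".toList : List Char) = ['\n'] := rfl
    rw [this] at h
    simp only [List.isEmpty_cons, if_false, Bool.false_eq_true] at h
    have hx : xs.map String.toList = PySem.Chars.splitOn s.toList ['\n'] := by
      injection h
    simp [hx, splitOn_eq_splitNL]

theorem splitNL_append (s t : List Char) :
    splitNL (s ++ '\n' :: t) = splitNL s ++ splitNL t := by
  induction s with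
  | nil => simp [splitNL]
  | cons c rest ih =>
    by_cases hc : c = '\n'
    · subst hc; simp [splitNL, ih]
    · simp only [List.cons_append, splitNL, if_neg hc, ih]
      obtain ⟨h, t', hr⟩ : ∃ h t', splitNL rest = h :: t' := by
        cases hs : splitNL rest with
        | nil => exact absurd hs (splitNL_ne_nil rest)
        | cons a t' => exact ⟨a, t', rfl⟩
      simp [hr, List.modifyHead]

-- the core fact: per-example blocks separated by one blank line = split of the "\n\n"-join
theorem flatMap_dropLast_eq (p : List Char) (ps : List (List Char)) :
    (List.flatMap (fun q => splitNL q ++ [[]]) (p :: ps)).dropLast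
      = splitNL (PySem.Chars.join ['\n', '\n'] (p :: ps)) := by
  induction ps generalizing p with
  | nil => simp [PySem.Chars.join_singleton]
  | cons q rest ih =>
    rw [PySem.Chars.join_cons_cons]
    have hnn : (p ++ ['\n', '\n'] ++ PySem.Chars.join ['\n', '\n'] (q :: rest))
        = p ++ '\n' :: ('\n' :: PySem.Chars.join ['\n', '\n'] (q :: rest)) := by simp
    rw [hnn, splitNL_append]
    have hstep : splitNL ('\n' :: PySem.Chars.join ['\n', '\n'] (q :: rest))
        = [] :: splitNL (PySem.Chars.join ['\n', '\n'] (q :: rest)) := by simp [splitNL]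
    rw [hstep, ← ih q]
    rw [List.flatMap_cons]
    rw [List.dropLast_append_of_ne_nil]
    · simp
    · have : List.flatMap (fun q => splitNL q ++ [[]]) (q :: rest) ≠ [] := by
        simp [List.flatMap_cons]
      exact this

theorem map_toList_inj (a b : List String) (h : a.map String.toList = b.map String.toList) : a = b := by
  have hinj : Function.Injective String.toList := fun _ _ => String.toList_injective
  exact (List.map_injective_iff.2 hinj) h

-- ===== VERDICT (by name: the statement is the Claim_ definition above) =====
theorem render_examples_py_spec : Claim_equal_render_examples_py := by
  intro examples _
  unfold Spec_render_examples_py render_examples_py render_examples_py_alt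
  cases examples with
  | nil => simp
  | cons e rest =>
    simp only [if_neg (List.cons_ne_nil e rest)]
    simp only [PySem.List.foldl_append_singleton, List.append_assoc,
      PySem.List.foldl_append_eq_flatMap, PySem.List.slice_to_neg_one]
    apply map_toList_inj
    rw [List.map_dropLast, List.map_append, List.map_append, List.map_flatMap]
    have hbody : ∀ ex : String, (fun ex => List.map String.toList (pySplitNL (PySem.Str.strip ex) ++ [""])) ex
        = (fun q => splitNL q ++ [[]]) (PySem.Chars.strip ex.toList) := by
      intro ex
      simp only [List.map_append]
      rw [pySplitNL_toList, PySem.Str.toList_strip]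
      rfl
    rw [funext hbody]
    rw [pySplitNL_toList, PySem.Str.toList_join]
    have h1 : ("\n\n".toList : List Char) = ['\n', '\n'] := rfl
    rw [h1, List.map_map]
    have h2 : (String.toList ∘ fun ex => PySem.Str.strip ex) = fun ex => PySem.Chars.strip ex.toList := by
      funext ex; simp [PySem.Str.toList_strip]
    rw [h2]
    have h3 : (e :: rest).map (fun ex => PySem.Chars.strip ex.toList)
        = PySem.Chars.strip e.toList :: rest.map (fun ex => PySem.Chars.strip ex.toList) := rfl
    rw [h3, ← flatMap_dropLast_eq, ← h3, List.flatMap_map]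
    rw [List.dropLast_append_of_ne_nil (by simp [List.flatMap_cons])]
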